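-- pv_equiv track=rewrite | github.com/ruihespanha/new-physics | Basic simulations/AISims/Final/NN_definition.py | get_simulation
-- ===== SOURCE A (Python) =====
-- def get_simulation(total_input_images, simulation_ids, simulation_times, simulation_id):
--
--     times = [
--         simulation_times[i]
--         for (i, id) in enumerate(simulation_ids)
--         if id == simulation_id
--     ]
--     images = [
--         total_input_images[i]
--         for (i, id) in enumerate(simulation_ids)
--         if id == simulation_id
--     ]
--     return (times, images)
-- ===== SOURCE B (Python) =====
-- def get_simulation(total_input_images, simulation_ids, simulation_times, simulation_id):
--     # Build an id -> [indices] index in one pass, then gather from it.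
--     index = {}
--     for i, x in enumerate(simulation_ids):
--         index.setdefault(x, []).append(i)
--     idx = index.get(simulation_id, [])
--     times = [simulation_times[i] for i in idx]
--     images = [total_input_images[i] for i in idx]
--     return (times, images)
-- ===== Notes on version B (the rewrite author's own statement) =====
-- stated objective: alternative
-- what changed: Replaces A's two filtering passes over enumerate(simulation_ids) with a hash index grouping every id to its list of positions, built once, from which the matching positions are looked up and the two result lists gathered.
import Mathlib
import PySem

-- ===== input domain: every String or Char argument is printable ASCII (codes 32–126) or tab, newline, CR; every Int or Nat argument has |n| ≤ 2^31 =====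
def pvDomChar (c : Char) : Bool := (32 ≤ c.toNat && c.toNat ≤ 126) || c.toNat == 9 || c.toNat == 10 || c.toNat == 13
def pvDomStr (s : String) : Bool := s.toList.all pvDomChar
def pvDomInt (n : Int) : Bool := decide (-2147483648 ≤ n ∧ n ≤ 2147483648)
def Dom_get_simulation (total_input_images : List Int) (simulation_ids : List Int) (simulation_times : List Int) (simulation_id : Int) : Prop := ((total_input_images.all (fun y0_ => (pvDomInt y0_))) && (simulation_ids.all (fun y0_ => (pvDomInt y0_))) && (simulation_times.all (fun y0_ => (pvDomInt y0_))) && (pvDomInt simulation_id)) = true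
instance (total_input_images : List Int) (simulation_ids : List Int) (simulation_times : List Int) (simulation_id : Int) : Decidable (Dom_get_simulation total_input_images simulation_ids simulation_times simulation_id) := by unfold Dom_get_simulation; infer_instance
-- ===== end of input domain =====

-- B replaces A's two filtering passes over enumerate(simulation_ids) by an id -> positions
-- hash index built in one pass, from which the matching positions are looked up and both
-- result lists gathered (alternative strategy, same O(n) cost; return-value equivalence).

-- ===== PORT A =====
-- A: two list comprehensions over enumerate(simulation_ids), indexing simulation_times[i] /
-- total_input_images[i]; pyGetD's default 0 is reached only outside Pre_ (Python IndexError).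
def get_simulation (total_input_images : List Int) (simulation_ids : List Int) (simulation_times : List Int) (simulation_id : Int) : List Int × List Int :=
  let times := (PySem.List.enumerate simulation_ids 0).foldl
    (fun acc p => if p.2 == simulation_id then acc ++ [PySem.List.pyGetD simulation_times p.1 0] else acc) []
  let images := (PySem.List.enumerate simulation_ids 0).foldl
    (fun acc p => if p.2 == simulation_id then acc ++ [PySem.List.pyGetD total_input_images p.1 0] else acc) []
  (times, images)

-- ===== PORT B =====
-- index.setdefault(x, []).append(i) = insert x (getD x [] ++ [i]) (overwrite keeps position,
-- new keys append — exactly Python's dict); then gather from idx = index.get(simulation_id, []).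
def get_simulation_alt (total_input_images : List Int) (simulation_ids : List Int) (simulation_times : List Int) (simulation_id : Int) : List Int × List Int :=
  let index : PySem.Dict Int (List Int) := (PySem.List.enumerate simulation_ids 0).foldl
    (fun d p => d.insert p.2 (d.getD p.2 [] ++ [p.1])) PySem.Dict.empty
  let idx := index.getD simulation_id []
  let times := idx.map (fun i => PySem.List.pyGetD simulation_times i 0)
  let images := idx.map (fun i => PySem.List.pyGetD total_input_images i 0)
  (times, images)

-- ===== PRECONDITION & SPEC =====
-- Pre_ excludes exactly the inputs where the Python programs raise IndexError: a position
-- with a matching simulation id that is out of range of simulation_times or total_input_images.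
def Pre_get_simulation (total_input_images : List Int) (simulation_ids : List Int) (simulation_times : List Int) (simulation_id : Int) : Prop :=
  ∀ k < simulation_ids.length, simulation_ids.getD k 0 = simulation_id →
    k < simulation_times.length ∧ k < total_input_images.length
instance (total_input_images : List Int) (simulation_ids : List Int) (simulation_times : List Int) (simulation_id : Int) : Decidable (Pre_get_simulation total_input_images simulation_ids simulation_times simulation_id) := by unfold Pre_get_simulation; infer_instance
def pvWitness_get_simulation : List Int × List Int × List Int × Int := ([10, 20, 30], [1, 2, 1], [5, 6, 7], 1)

def Spec_get_simulation (total_input_images : List Int) (simulation_ids : List Int) (simulation_times : List Int) (simulation_id : Int) (out : List Int × List Int) : Prop := out = get_simulation_alt total_input_images simulation_ids simulation_times simulation_id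
instance (total_input_images : List Int) (simulation_ids : List Int) (simulation_times : List Int) (simulation_id : Int) (out : List Int × List Int) : Decidable (Spec_get_simulation total_input_images simulation_ids simulation_times simulation_id out) := by unfold Spec_get_simulation; infer_instance

-- ===== CLAIM (what is proved, stated in full; the proofs are below) =====
def Claim_equal_get_simulation : Prop := ∀ (total_input_images : List Int) (simulation_ids : List Int) (simulation_times : List Int) (simulation_id : Int), Dom_get_simulation total_input_images simulation_ids simulation_times simulation_id → Pre_get_simulation total_input_images simulation_ids simulation_times simulation_id → Spec_get_simulation total_input_images simulation_ids simulation_times simulation_id (get_simulation total_input_images simulation_ids simulation_times simulation_id)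

-- ===== LEMMAS AND PROOFS =====

-- The grouping fold: looking up sid in the built index yields exactly the first components
-- of the enumerate entries whose id matches sid, in order.
theorem index_fold_getD (sid : Int) : ∀ (ids : List Int) (n : Int) (d : PySem.Dict Int (List Int)),
    ((PySem.List.enumerate ids n).foldl
        (fun d p => d.insert p.2 (d.getD p.2 [] ++ [p.1])) d).getD sid []
      = d.getD sid [] ++ (((PySem.List.enumerate ids n).filter (fun p => p.2 == sid)).map (·.1)) := by
  intro ids
  induction ids with
  | nil => intro n d; simp [PySem.List.enumerate_nil]
  | cons x xs ih =>
    intro n d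
    rw [PySem.List.enumerate_cons]
    simp only [List.foldl_cons, List.filter_cons]
    rw [ih]
    by_cases hx : (x == sid) = true
    · have hx' : sid = x := (beq_iff_eq.mp hx).symm
      simp [PySem.Dict.getD_insert, hx']
    · have hx' : ¬ sid = x := fun h => hx (beq_iff_eq.mpr h.symm)
      have hx'' : ¬ x = sid := fun h => hx (beq_iff_eq.mpr h)
      simp [hx, PySem.Dict.getD_insert, hx', hx'']

-- ===== VERDICT (by name: the statement is the Claim_ definition above) =====
theorem get_simulation_spec : Claim_equal_get_simulation := by
  intro ims ids ts sid _ _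
  unfold Spec_get_simulation get_simulation get_simulation_alt
  simp only [PySem.List.foldl_append_if, index_fold_getD sid ids 0 PySem.Dict.empty,
    ]
  simp
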